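-- pv_equiv track=rewrite | github.com/otaviopl/bot-discord | bot/notion_client.py | _find_category_property_name
-- ===== SOURCE A (Python) =====
-- from typing import Any, Dict, List, Optional
--
-- def _find_category_property_name(properties: Dict[str, Any]) -> Optional[str]:
--     preferred_keys = ("categories", "category", "categorias", "categoria")
--     for key, prop in properties.items():
--         normalized_key = key.strip().lower()
--         if normalized_key not in preferred_keys:
--             continue
--         if prop.get("type") in ("multi_select", "select"):
--             return key
--
--     for key, prop in properties.items():
--         if prop.get("type") in ("multi_select", "select"):
--             return key
--     return None
-- ===== SOURCE B (Python) =====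
-- from typing import Any, Dict, List, Optional
--
-- def _find_category_property_name(properties: Dict[str, Any]) -> Optional[str]:
--     preferred_keys = ("categories", "category", "categorias", "categoria")
--     fallback = None
--     for key, prop in properties.items():
--         if prop.get("type") in ("multi_select", "select"):
--             if key.strip().lower() in preferred_keys:
--                 return key
--             if fallback is None:
--                 fallback = key
--     return fallback
-- ===== Notes on version B (the rewrite author's own statement) =====
-- stated objective: simpler
-- what changed: Replaces A's two sequential scans of the dict with a single pass that returns a preferred-named typed key immediately and otherwise remembers the first typed key in a fallback variable returned at the end.
import Mathlib
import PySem

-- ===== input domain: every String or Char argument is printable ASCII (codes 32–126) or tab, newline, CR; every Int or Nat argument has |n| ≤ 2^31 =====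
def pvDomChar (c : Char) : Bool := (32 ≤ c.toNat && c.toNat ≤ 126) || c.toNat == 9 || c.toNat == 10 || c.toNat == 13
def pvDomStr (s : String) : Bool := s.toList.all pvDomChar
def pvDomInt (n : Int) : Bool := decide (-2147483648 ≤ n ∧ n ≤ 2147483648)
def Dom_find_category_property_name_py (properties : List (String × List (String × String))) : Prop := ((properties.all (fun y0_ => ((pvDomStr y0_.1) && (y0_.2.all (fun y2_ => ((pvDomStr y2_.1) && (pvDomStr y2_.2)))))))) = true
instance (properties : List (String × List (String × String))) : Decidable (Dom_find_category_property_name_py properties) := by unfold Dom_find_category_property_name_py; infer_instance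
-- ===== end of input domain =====

-- B replaces A's two sequential scans with one pass keeping a fallback variable (simpler, same O(n) cost).

-- shared helpers (both Pythons compute these identically):
-- the preferred key names
def pvPref : List String := ["categories", "category", "categorias", "categoria"]
-- key.strip().lower()
def pvNorm (k : String) : String := PySem.Str.lower (PySem.Str.strip k)
-- prop.get("type") in ("multi_select", "select")  (prop is a dict, looked up per Python dict semantics)
def pvTyped (prop : List (String × String)) : Bool :=
  let t := (PySem.Dict.ofList prop).get? "type"
  t == some "multi_select" || t == some "select"

-- ===== PORT A =====
-- first loop: preferred-named keys whose type matches
def pvFindPref : List (String × List (String × String)) → Option String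
  | [] => none
  | (key, prop) :: rest =>
    if ¬ (pvPref.contains (pvNorm key)) then pvFindPref rest
    else if pvTyped prop then some key
    else pvFindPref rest

-- second loop: any key whose type matches
def pvFindTyped : List (String × List (String × String)) → Option String
  | [] => none
  | (key, prop) :: rest =>
    if pvTyped prop then some key else pvFindTyped rest

def find_category_property_name_py (properties : List (String × List (String × String))) : Option String :=
  -- properties.items(): the assoc list viewed as a Python dict (duplicate keys merge as in dict())
  let items := (PySem.Dict.ofList properties).items
  match pvFindPref items with
  | some key => some key
  | none => pvFindTyped items

-- ===== PORT B =====
-- single pass with a fallback accumulator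
def pvAltLoop : List (String × List (String × String)) → Option String → Option String
  | [], fallback => fallback
  | (key, prop) :: rest, fallback =>
    if pvTyped prop then
      if pvPref.contains (pvNorm key) then some key
      else pvAltLoop rest (if fallback.isNone then some key else fallback)
    else pvAltLoop rest fallback

def find_category_property_name_py_alt (properties : List (String × List (String × String))) : Option String :=
  pvAltLoop (PySem.Dict.ofList properties).items none

-- ===== PRECONDITION & SPEC =====
def Spec_find_category_property_name_py (properties : List (String × List (String × String))) (out : Option String) : Prop := out = find_category_property_name_py_alt properties
instance (properties : List (String × List (String × String))) (out : Option String) : Decidable (Spec_find_category_property_name_py properties out) := by unfold Spec_find_category_property_name_py; infer_instance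

-- ===== CLAIM (what is proved, stated in full; the proofs are below) =====
def Claim_equal_find_category_property_name_py : Prop := ∀ (properties : List (String × List (String × String))), Dom_find_category_property_name_py properties → Spec_find_category_property_name_py properties (find_category_property_name_py properties)

-- ===== LEMMAS AND PROOFS =====
-- Loop invariant: B's single pass equals A's first scan, then the earlier fallback, then A's second scan.
theorem pvAltLoop_eq (xs : List (String × List (String × String))) (fb : Option String) :
    pvAltLoop xs fb =
      match pvFindPref xs with
      | some k => some k
      | none => match fb with
        | some f => some f
        | none => pvFindTyped xs := by
  induction xs generalizing fb with
  | nil => cases fb <;> simp [pvAltLoop, pvFindPref, pvFindTyped]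
  | cons hd rest ih =>
    obtain ⟨key, prop⟩ := hd
    by_cases ht : pvTyped prop <;> by_cases hp : pvNorm key ∈ pvPref <;>
      cases fb <;>
      simp [pvAltLoop, pvFindPref, pvFindTyped, ht, hp, ih] <;>
      cases pvFindPref rest <;> simp

-- ===== VERDICT (by name: the statement is the Claim_ definition above) =====
theorem find_category_property_name_py_spec : Claim_equal_find_category_property_name_py := by
  intro properties _
  unfold Spec_find_category_property_name_py find_category_property_name_py find_category_property_name_py_alt
  rw [pvAltLoop_eq]
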